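-- pv_equiv track=rewrite | github.com/Penguinbeanie/TSAD_Seminar | Dataset_Creation/preparation_code/medium_anomaly_identifier.py | identify_anomalies
-- ===== SOURCE A (Python) =====
-- def identify_anomalies(data_values, min_val=530, max_val=700, min_len=3, max_len=4):
--     """
--     Identifies anomalies in a list of data values.
--     Anomalies are sequences of exactly 3 or 4 consecutive points > min_val and < max_val.
--     """
--     num_points = len(data_values)
--     predicted_anomalies = [0] * num_points
--
--     i = 0
--     while i < num_points:
--         # Check if current point is in the target range
--         if data_values[i] > min_val and data_values[i] < max_val:
--             # Found start of a potential sequence - count consecutive points in range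
--             start_index = i
--             sequence_length = 0
--
--             # Count all consecutive points in the range
--             while i < num_points and data_values[i] > min_val and data_values[i] < max_val:
--                 sequence_length += 1
--                 i += 1
--
--             # Check if sequence length is exactly 3 or 4
--             if sequence_length == 3 or sequence_length == 4:
--                 # Mark all points in this sequence as anomalies
--                 for j in range(start_index, start_index + sequence_length):
--                     predicted_anomalies[j] = 1
--
--             # i is already positioned at the next point after the sequence
--         else:
--             # Point is not in range, move to next point
--             i += 1
--
--     return predicted_anomalies
-- ===== SOURCE B (Python) =====
-- def identify_anomalies(data_values, min_val=530, max_val=700, min_len=3, max_len=4):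
--     """Run-splitting re-implementation: compute the in-range mask, then emit the
--     output run by run (a block of 1s for an in-range run of length 3 or 4, a
--     block of 0s otherwise).  Like the original, the run-length test is the
--     literal 3-or-4 check; min_len/max_len are accepted but unused."""
--     mask = [min_val < x < max_val for x in data_values]
--     out = []
--     while mask:
--         k = mask[0]
--         n = 1
--         while n < len(mask) and mask[n] == k:
--             n += 1
--         out.extend([1] * n if k and n in (3, 4) else [0] * n)
--         mask = mask[n:]
--     return out
-- ===== Notes on version B (the rewrite author's own statement) =====
-- stated objective: alternative
-- what changed: B precomputes the in-range boolean mask and builds the output run by run (emitting a whole block of 1s or 0s per maximal run), instead of A's index walk that pre-allocates a zero array and marks positions in place with a nested counting loop.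
import Mathlib
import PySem

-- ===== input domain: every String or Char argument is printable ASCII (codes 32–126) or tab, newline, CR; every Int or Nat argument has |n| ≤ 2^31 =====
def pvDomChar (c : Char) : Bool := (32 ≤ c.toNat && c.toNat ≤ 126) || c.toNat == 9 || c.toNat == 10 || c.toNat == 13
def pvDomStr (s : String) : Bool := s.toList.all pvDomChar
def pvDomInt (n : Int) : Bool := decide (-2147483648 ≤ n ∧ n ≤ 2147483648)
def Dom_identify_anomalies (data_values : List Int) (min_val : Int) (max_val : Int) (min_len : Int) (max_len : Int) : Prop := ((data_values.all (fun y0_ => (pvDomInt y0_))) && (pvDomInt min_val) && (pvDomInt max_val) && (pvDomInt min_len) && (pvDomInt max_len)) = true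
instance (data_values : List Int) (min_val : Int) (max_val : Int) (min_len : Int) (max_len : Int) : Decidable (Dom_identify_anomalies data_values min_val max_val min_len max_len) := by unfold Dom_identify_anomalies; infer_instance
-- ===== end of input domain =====

-- B builds the output run by run from the precomputed in-range mask, instead of
-- A's index walk marking a pre-allocated zero array in place (objective: alternative).
-- Like the Python A, both ports ignore min_len/max_len (the 3-or-4 test is A's literal code).
-- The `fuel` parameters below are totality guards only: each loop runs at most
-- `length` iterations, so the fuel the entry points pass is never exhausted.

-- ===== PORT A =====
-- inner while: "while i < num_points and min_val < data_values[i] < max_val: len += 1; i += 1",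
-- returning (sequence_length, i).  data_values[i] is read only under the guard i < num_points,
-- so getD is exact there.
def pvRunScan (data : List Int) (mn mx : Int) (n : Nat) : Nat → Nat → Nat → Nat × Nat
  | 0, len, i => (len, i)
  | fuel + 1, len, i =>
    if i < n ∧ (mn < data.getD i 0 ∧ data.getD i 0 < mx) then
      pvRunScan data mn mx n fuel (len + 1) (i + 1)
    else (len, i)

-- "for j in range(start_index, start_index + sequence_length): predicted_anomalies[j] = 1"
def pvMarkOnes (pred : List Int) (start : Nat) : Nat → List Int
  | 0 => pred
  | l + 1 => pvMarkOnes (pred.set start 1) (start + 1) l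

-- outer while loop over the index i
def pvALoop (data : List Int) (mn mx : Int) (n : Nat) : Nat → List Int → Nat → List Int
  | 0, pred, _ => pred
  | fuel + 1, pred, i =>
    if i < n then
      if mn < data.getD i 0 ∧ data.getD i 0 < mx then
        let r := pvRunScan data mn mx n n 0 i
        let pred' := if r.1 = 3 ∨ r.1 = 4 then pvMarkOnes pred i r.1 else pred
        pvALoop data mn mx n fuel pred' r.2
      else pvALoop data mn mx n fuel pred (i + 1)
    else pred

def identify_anomalies (data_values : List Int) (min_val : Int) (max_val : Int) (min_len : Int) (max_len : Int) : List Int :=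
  pvALoop data_values min_val max_val data_values.length data_values.length
    (List.replicate data_values.length 0) 0

-- ===== PORT B =====
-- the in-range mask predicate "min_val < x < max_val" of Source B
def pvInRangeB (mn mx x : Int) : Bool := decide (mn < x) && decide (x < mx)

-- the outer while of Source B: split the mask into maximal equal runs, emit one block per run
def pvMarkRuns : Nat → List Bool → List Int
  | _, [] => []
  | 0, _ => []
  | fuel + 1, k :: rest =>
    let run := rest.takeWhile (· == k)
    let n := run.length + 1
    (if k && (n == 3 || n == 4) then List.replicate n (1 : Int) else List.replicate n 0)
      ++ pvMarkRuns fuel (rest.dropWhile (· == k))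

def identify_anomalies_alt (data_values : List Int) (min_val : Int) (max_val : Int) (min_len : Int) (max_len : Int) : List Int :=
  pvMarkRuns data_values.length (data_values.map (pvInRangeB min_val max_val))

-- ===== PRECONDITION & SPEC =====
def Spec_identify_anomalies (data_values : List Int) (min_val : Int) (max_val : Int) (min_len : Int) (max_len : Int) (out : List Int) : Prop := out = identify_anomalies_alt data_values min_val max_val min_len max_len
instance (data_values : List Int) (min_val : Int) (max_val : Int) (min_len : Int) (max_len : Int) (out : List Int) : Decidable (Spec_identify_anomalies data_values min_val max_val min_len max_len out) := by unfold Spec_identify_anomalies; infer_instance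

-- ===== CLAIM (what is proved, stated in full; the proofs are below) =====
def Claim_equal_identify_anomalies : Prop := ∀ (data_values : List Int) (min_val : Int) (max_val : Int) (min_len : Int) (max_len : Int), Dom_identify_anomalies data_values min_val max_val min_len max_len → Spec_identify_anomalies data_values min_val max_val min_len max_len (identify_anomalies data_values min_val max_val min_len max_len)

-- ===== LEMMAS AND PROOFS =====

-- pvMarkRuns ignores the exact fuel as long as it is at least the list length
theorem pvMarkRuns_fuel : ∀ f g (l : List Bool), l.length ≤ f → l.length ≤ g →
    pvMarkRuns f l = pvMarkRuns g l := by
  intro f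
  induction f with
  | zero =>
    intro g l hf _
    have hl : l = [] := by cases l <;> simp_all
    subst hl
    cases g <;> rfl
  | succ f ih =>
    intro g l hf hg
    cases l with
    | nil => cases g <;> rfl
    | cons k rest =>
      cases g with
      | zero => simp at hg
      | succ g =>
        simp only [pvMarkRuns]
        congr 1
        have hd := (List.dropWhile_sublist (l := rest) (· == k)).length_le
        exact ih g _ (by simp at hf; omega) (by simp at hg; omega)

-- pvMarkRuns with its canonical fuel (= the list's length)
def pvMR (l : List Bool) : List Int := pvMarkRuns l.length l

theorem pvMR_eq (f : Nat) (l : List Bool) (h : l.length ≤ f) : pvMarkRuns f l = pvMR l :=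
  pvMarkRuns_fuel f l.length l h (le_refl _)

theorem pvMR_nil : pvMR [] = [] := rfl

theorem pvMR_cons (k : Bool) (rest : List Bool) :
    pvMR (k :: rest)
      = (if k && ((rest.takeWhile (· == k)).length + 1 == 3 || (rest.takeWhile (· == k)).length + 1 == 4)
          then List.replicate ((rest.takeWhile (· == k)).length + 1) (1 : Int)
          else List.replicate ((rest.takeWhile (· == k)).length + 1) 0)
        ++ pvMR (rest.dropWhile (· == k)) := by
  show pvMarkRuns (rest.length + 1) (k :: rest) = _
  simp only [pvMarkRuns]
  congr 1
  exact pvMR_eq rest.length _ (List.dropWhile_sublist (· == k)).length_le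

theorem pvMR_false_cons (rest : List Bool) :
    pvMR (false :: rest) = 0 :: pvMR rest := by
  rcases rest with _ | ⟨b, rest'⟩
  · rfl
  · cases b
    · rw [pvMR_cons, pvMR_cons]
      simp [List.replicate_succ]
    · rw [pvMR_cons]
      simp [List.replicate_succ]

-- the mask at a position below the length splits off its head
theorem pvMask_cons (data : List Int) (mn mx : Int) (i : Nat) (h1 : i < data.length) :
    (data.map (pvInRangeB mn mx)).drop i
      = pvInRangeB mn mx data[i] :: (data.map (pvInRangeB mn mx)).drop (i + 1) := by
  rw [← List.map_drop, List.drop_eq_getElem_cons h1, List.map_cons, List.map_drop]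

-- length of the maximal true-run of the mask starting at position i
def pvT (data : List Int) (mn mx : Int) (i : Nat) : Nat :=
  (((data.map (pvInRangeB mn mx)).drop i).takeWhile (· == true)).length

theorem pv_drop_takeWhile (l : List Bool) (p : Bool → Bool) :
    l.drop (l.takeWhile p).length = l.dropWhile p := by
  induction l with
  | nil => simp
  | cons a t ih => by_cases h : p a <;> simp [h, ih]

-- spec of the inner while: it returns the run length and the index just past the run
theorem pvRunScan_spec (data : List Int) (mn mx : Int) :
    ∀ f len i, data.length - i ≤ f →
      pvRunScan data mn mx data.length f len i
        = (len + pvT data mn mx i, i + pvT data mn mx i) := by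
  intro f
  induction f with
  | zero =>
    intro len i hf
    have hT : pvT data mn mx i = 0 := by
      unfold pvT
      have : (data.map (pvInRangeB mn mx)).drop i = [] := by
        rw [List.drop_eq_nil_iff]; simp; omega
      rw [this]; simp
    simp [pvRunScan, hT]
  | succ f ih =>
    intro len i hf
    rw [pvRunScan]
    by_cases hg : i < data.length ∧ (mn < data.getD i 0 ∧ data.getD i 0 < mx)
    · rw [if_pos hg]
      obtain ⟨h1, h2⟩ := hg
      have hi : data.getD i 0 = data[i] := List.getD_eq_getElem data 0 h1
      have hmask := pvMask_cons data mn mx i h1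
      have htrue : pvInRangeB mn mx data[i] = true := by
        rw [hi] at h2
        simp only [pvInRangeB, Bool.and_eq_true, decide_eq_true_eq]
        exact h2
      have hT : pvT data mn mx i = pvT data mn mx (i + 1) + 1 := by
        unfold pvT; rw [hmask]; simp [htrue]
      rw [ih (len + 1) (i + 1) (by omega), hT]
      simp only [Prod.mk.injEq]
      omega
    · rw [if_neg hg]
      have hT : pvT data mn mx i = 0 := by
        unfold pvT
        by_cases h1 : i < data.length
        · have hi : data.getD i 0 = data[i] := List.getD_eq_getElem data 0 h1
          have h2 : ¬(mn < data.getD i 0 ∧ data.getD i 0 < mx) := fun hx => hg ⟨h1, hx⟩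
          rw [hi] at h2
          have hmask := pvMask_cons data mn mx i h1
          have hfalse : pvInRangeB mn mx data[i] = false := by
            simp only [pvInRangeB, Bool.and_eq_false_iff, decide_eq_false_iff_not]
            by_cases hlt : mn < data[i]
            · exact Or.inr (fun hx => h2 ⟨hlt, hx⟩)
            · exact Or.inl hlt
          rw [hmask]; simp [hfalse]
        · have : (data.map (pvInRangeB mn mx)).drop i = [] := by
            rw [List.drop_eq_nil_iff]; simp; omega
          rw [this]; simp
      simp [hT]

theorem pvMarkOnes_spec (pred : List Int) (start l : Nat) (h : start + l ≤ pred.length) :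
    pvMarkOnes pred start l = pred.take start ++ List.replicate l 1 ++ pred.drop (start + l) := by
  induction l generalizing pred start with
  | zero => simp [pvMarkOnes]
  | succ l ih =>
    have hlt : start < pred.length := by omega
    rw [pvMarkOnes, ih _ _ (by simp; omega), List.set_eq_take_cons_drop 1 hlt]
    have hT : (pred.take start).length = start := by simp; omega
    have e1 : ∀ (T D : List Int), (T ++ 1 :: D).take (T.length + 1) = T ++ [1] := by
      intro T D; simp [List.take_append]
    have e2 : ∀ (T D : List Int) (m : Nat), (T ++ 1 :: D).drop (T.length + 1 + m) = D.drop m := by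
      intro T D m
      rw [show T.length + 1 + m = T.length + (1 + m) by omega, List.drop_append]
      simp [Nat.add_comm 1 m]
    have e1' := e1 (pred.take start) (pred.drop (start + 1))
    have e2' := e2 (pred.take start) (pred.drop (start + 1)) l
    rw [hT] at e1' e2'
    rw [e1', e2']
    rw [List.drop_drop, show start + 1 + l = start + (l + 1) by omega]
    simp [List.replicate_succ]

-- the exhausted-input tail: once i ≥ length the remaining claim is trivial
theorem pv_done (data : List Int) (mn mx : Int) (pred : List Int) (i : Nat)
    (hlen : pred.length = data.length) (h : data.length ≤ i) :
    pred = pred.take i ++ pvMR ((data.map (pvInRangeB mn mx)).drop i) := by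
  rw [List.take_of_length_le (by omega)]
  rw [List.drop_eq_nil_of_le (by simpa using h)]
  simp [pvMR_nil]

theorem pvALoop_eq (data : List Int) (mn mx : Int) :
    ∀ fuel i pred, data.length - i ≤ fuel → pred.length = data.length →
      pred.drop i = List.replicate (data.length - i) 0 →
      pvALoop data mn mx data.length fuel pred i
        = pred.take i ++ pvMR ((data.map (pvInRangeB mn mx)).drop i) := by
  intro fuel
  induction fuel with
  | zero =>
    intro i pred hk hlen _
    exact pv_done data mn mx pred i hlen (by omega)
  | succ fuel ih =>
    intro i pred hk hlen hz
    by_cases h : i < data.length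
    · have hi : data.getD i 0 = data[i] := List.getD_eq_getElem data 0 h
      have hmask := pvMask_cons data mn mx i h
      by_cases hr : mn < data.getD i 0 ∧ data.getD i 0 < mx
      · -- the point is in range: a run of length T starts here
        have htrue : pvInRangeB mn mx data[i] = true := by
          rw [hi] at hr
          simp only [pvInRangeB, Bool.and_eq_true, decide_eq_true_eq]; exact hr
        set T := pvT data mn mx i with hTdef
        have hTs : T = pvT data mn mx (i + 1) + 1 := by
          rw [hTdef]; unfold pvT; rw [hmask]; simp [htrue]
        have hTle : T ≤ data.length - i := by
          rw [hTdef]; unfold pvT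
          have h1 := (List.takeWhile_sublist (l := (data.map (pvInRangeB mn mx)).drop i) (· == true)).length_le
          simpa using h1
        have htail : ((data.map (pvInRangeB mn mx)).drop (i + 1)).dropWhile (· == true)
            = (data.map (pvInRangeB mn mx)).drop (i + T) := by
          rw [← pv_drop_takeWhile, List.drop_drop]
          congr 1
          rw [hTs]; unfold pvT; omega
        have hT' : (((data.map (pvInRangeB mn mx)).drop (i + 1)).takeWhile (· == true)).length + 1
            = T := by rw [hTs]; rfl
        have hrw : pvMR (true :: (data.map (pvInRangeB mn mx)).drop (i + 1))
            = (if (T == 3 || T == 4) then List.replicate T (1 : Int) else List.replicate T 0)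
              ++ pvMR ((data.map (pvInRangeB mn mx)).drop (i + T)) := by
          rw [pvMR_cons]
          simp only [Bool.true_and, hT', htail]
        have hdropp : pred.drop (i + T) = List.replicate (data.length - (i + T)) 0 := by
          have hdd : pred.drop (i + T) = (pred.drop i).drop T := by
            rw [List.drop_drop, Nat.add_comm]
          rw [hdd, hz, List.drop_replicate]
          congr 1; omega
        rw [pvALoop, if_pos h, if_pos hr]
        simp only [pvRunScan_spec data mn mx data.length 0 i (by omega), Nat.zero_add, ← hTdef]
        rw [hmask, htrue, hrw]
        by_cases hc : T = 3 ∨ T = 4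
        · rw [if_pos hc]
          have hcb : (T == 3 || T == 4) = true := by
            rcases hc with h3 | h3 <;> simp [h3]
          rw [if_pos hcb]
          have hmark := pvMarkOnes_spec pred i T (by omega)
          have hplen : (pred.take i ++ List.replicate T (1 : Int)).length = i + T := by
            simp; omega
          have habl : ∀ X : List Int,
              ((pred.take i ++ List.replicate T (1 : Int)) ++ X).drop (i + T) = X := by
            intro X
            rw [show i + T = (pred.take i ++ List.replicate T (1 : Int)).length from hplen.symm]
            simp [List.drop_append]
          have habt : ∀ X : List Int,
              ((pred.take i ++ List.replicate T (1 : Int)) ++ X).take (i + T)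
                = pred.take i ++ List.replicate T 1 := by
            intro X
            rw [show i + T = (pred.take i ++ List.replicate T (1 : Int)).length from hplen.symm]
            exact List.take_left
          have hdropm : (pvMarkOnes pred i T).drop (i + T)
              = List.replicate (data.length - (i + T)) 0 := by
            rw [hmark, habl]; exact hdropp
          rw [ih (i + T) (pvMarkOnes pred i T) (by omega)
              (by rw [hmark]; simp; omega) hdropm]
          have htake : (pvMarkOnes pred i T).take (i + T)
              = pred.take i ++ List.replicate T 1 := by
            rw [hmark, habt]
          rw [htake]
          simp [List.append_assoc]
        · rw [if_neg hc]
          have hcb : (T == 3 || T == 4) = false := by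
            simp only [Bool.or_eq_false_iff, beq_eq_false_iff_ne]
            exact ⟨fun h3 => hc (Or.inl h3), fun h4 => hc (Or.inr h4)⟩
          rw [if_neg (by simp [hcb])]
          rw [ih (i + T) pred (by omega) hlen hdropp]
          have htake : pred.take (i + T) = pred.take i ++ List.replicate T 0 := by
            rw [List.take_add, hz]
            congr 1
            rw [List.take_replicate, Nat.min_eq_left (by omega)]
          rw [htake]
          simp [List.append_assoc]
      · -- the point is out of range: A advances by one, B's run lemma peels one 0
        have hfalse : pvInRangeB mn mx data[i] = false := by
          rw [hi] at hr
          simp only [pvInRangeB, Bool.and_eq_false_iff, decide_eq_false_iff_not]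
          by_cases hlt : mn < data[i]
          · exact Or.inr (fun hx => hr ⟨hlt, hx⟩)
          · exact Or.inl hlt
        rw [pvALoop, if_pos h, if_neg hr]
        have hz' : pred.drop (i + 1) = List.replicate (data.length - (i + 1)) 0 := by
          have : pred.drop (i + 1) = (pred.drop i).drop 1 := by
            rw [List.drop_drop, Nat.add_comm]
          rw [this, hz, List.drop_replicate, Nat.sub_sub]
        rw [ih (i + 1) pred (by omega) hlen hz']
        have hp0 : pred[i]'(by omega) = 0 := by
          have h0 : (0 : Nat) < (pred.drop i).length := by simp; omega
          have hg : (pred.drop i)[0]'h0 = pred[i]'(by omega) := by simp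
          rw [← hg]
          simp [hz]
        rw [List.take_succ_eq_append_getElem (by omega), hp0]
        rw [hmask, hfalse, pvMR_false_cons]
        simp [List.append_assoc]
    · rw [pvALoop, if_neg h]
      exact pv_done data mn mx pred i hlen (by omega)

-- ===== VERDICT (by name: the statement is the Claim_ definition above) =====
theorem identify_anomalies_spec : Claim_equal_identify_anomalies := by
  intro data mn mx _ _ _
  unfold Spec_identify_anomalies identify_anomalies identify_anomalies_alt
  have h := pvALoop_eq data mn mx data.length 0 (List.replicate data.length 0)
    (by omega) (by simp) (by simp)
  rw [h]
  simp [pvMR]
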